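-- pv_equiv track=rewrite | github.com/mtsatal/ai | Rpi.py | dmm
-- ===== SOURCE A (Python) =====
-- from typing import Dict, List
--
-- def dmm(query: str) -> List[str]:
--     q = query.lower()
--     if any(word in q for word in ["forward", "backward", "left", "right", "stop"]):
--         return [f"move {q}"]
--     elif any(word in q for word in ["weather", "news", "today", "temperature"]):
--         return [f"realtime {q}"]
--     elif any(word in q for word in ["bye", "exit", "quit"]):
--         return ["exit"]
--     else:
--         return [f"general {q}"]
-- ===== SOURCE B (Python) =====
-- # Instead of a first-match if/elif chain, scan ALL keywords once, take the
-- # minimum priority among those that occur in the query, and map the priority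
-- # to the answer.  Correct because the chain's tiers are ordered by priority
-- # and the output within a tier does not depend on which keyword matched.
-- PRIORITY = {
--     "forward": 0, "backward": 0, "left": 0, "right": 0, "stop": 0,
--     "weather": 1, "news": 1, "today": 1, "temperature": 1,
--     "bye": 2, "exit": 2, "quit": 2,
-- }
--
-- def dmm(query: str):
--     q = query.lower()
--     tier = min((p for w, p in PRIORITY.items() if w in q), default=3)
--     return [["move " + q], ["realtime " + q], ["exit"], ["general " + q]][tier]
-- ===== Notes on version B (the rewrite author's own statement) =====
-- stated objective: alternative
-- what changed: Replaces the short-circuiting if/elif tier chain by a single exhaustive scan of a keyword-to-priority map, taking the minimum matched priority and indexing a table of answers with it.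
import Mathlib
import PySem

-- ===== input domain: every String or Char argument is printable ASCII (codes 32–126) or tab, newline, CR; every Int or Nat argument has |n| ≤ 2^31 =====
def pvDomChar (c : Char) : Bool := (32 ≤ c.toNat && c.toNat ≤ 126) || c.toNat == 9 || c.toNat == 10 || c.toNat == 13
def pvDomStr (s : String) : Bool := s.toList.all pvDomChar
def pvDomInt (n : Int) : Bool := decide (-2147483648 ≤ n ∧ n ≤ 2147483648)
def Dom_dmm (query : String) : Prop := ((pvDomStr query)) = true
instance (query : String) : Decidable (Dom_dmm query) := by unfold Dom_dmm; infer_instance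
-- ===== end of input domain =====

-- B replaces A's short-circuiting if/elif chain by one exhaustive scan of a keyword→priority map,
-- taking the minimum matched priority and indexing an answer table with it (alternative; same cost).

-- ===== PORT A =====
def dmm (query : String) : List String :=
  let q := PySem.Str.lower query
  if (["forward", "backward", "left", "right", "stop"].any fun w => PySem.Str.isIn w q) then
    ["move " ++ q]
  else if (["weather", "news", "today", "temperature"].any fun w => PySem.Str.isIn w q) then
    ["realtime " ++ q]
  else if (["bye", "exit", "quit"].any fun w => PySem.Str.isIn w q) then
    ["exit"]
  else
    ["general " ++ q]

-- ===== PORT B =====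
def dmmPriority : List (String × Nat) :=
  [("forward", 0), ("backward", 0), ("left", 0), ("right", 0), ("stop", 0),
   ("weather", 1), ("news", 1), ("today", 1), ("temperature", 1),
   ("bye", 2), ("exit", 2), ("quit", 2)]

def dmm_alt (query : String) : List String :=
  let q := PySem.Str.lower query
  -- min over matched priorities with default 3, as a fold over the whole map
  let tier := dmmPriority.foldl (fun acc wp => if PySem.Str.isIn wp.1 q then min acc wp.2 else acc) 3
  [["move " ++ q], ["realtime " ++ q], ["exit"], ["general " ++ q]].getD tier []

-- ===== PRECONDITION & SPEC =====
def Spec_dmm (query : String) (out : List String) : Prop := out = dmm_alt query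
instance (query : String) (out : List String) : Decidable (Spec_dmm query out) := by unfold Spec_dmm; infer_instance

-- ===== CLAIM =====
def Claim_equal_dmm : Prop := ∀ (query : String), Dom_dmm query → Spec_dmm query (dmm query)

-- ===== LEMMAS AND PROOFS =====

-- the min-fold over one priority group: it lowers the accumulator to p exactly when some keyword matches
theorem dmm_fold_group (q : String) (p : Nat) (ws : List String) : ∀ (a : Nat),
    (ws.map (fun w => (w, p))).foldl
      (fun acc wp => if PySem.Str.isIn wp.1 q then min acc wp.2 else acc) a
    = if ws.any (fun w => PySem.Str.isIn w q) then min a p else a := by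
  induction ws with
  | nil => intro a; simp
  | cons w ws ih =>
    intro a
    cases h : PySem.Str.isIn w q with
    | true =>
      simp only [List.map_cons, List.foldl_cons, List.any_cons, h, Bool.true_or, if_true, ih]
      split <;> omega
    | false =>
      simp only [List.map_cons, List.foldl_cons, List.any_cons, h, Bool.false_or,
        Bool.false_eq_true, if_false, ih]

-- the full priority table is the three groups, each tagged with its tier
theorem dmmPriority_eq :
    dmmPriority =
      (["forward", "backward", "left", "right", "stop"].map (fun w => (w, 0)))
      ++ (["weather", "news", "today", "temperature"].map (fun w => (w, 1)))
      ++ (["bye", "exit", "quit"].map (fun w => (w, 2))) := rfl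

-- ===== VERDICT =====
theorem dmm_spec : Claim_equal_dmm := by
  intro query _
  unfold Spec_dmm dmm dmm_alt
  rw [dmmPriority_eq]
  simp only [List.foldl_append, dmm_fold_group]
  cases h1 : (["forward", "backward", "left", "right", "stop"].any
      fun w => PySem.Str.isIn w (PySem.Str.lower query)) <;>
  cases h2 : (["weather", "news", "today", "temperature"].any
      fun w => PySem.Str.isIn w (PySem.Str.lower query)) <;>
  cases h3 : (["bye", "exit", "quit"].any
      fun w => PySem.Str.isIn w (PySem.Str.lower query)) <;>
  simp only [h1, h2, h3, Bool.false_eq_true, if_false, if_true] <;> rfl
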